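-- pv_equiv track=rewrite | github.com/CraigRiggins/rustproofing | cobol_parser.py | _join_continuations
-- ===== SOURCE A (Python) =====
-- def _join_continuations(
--     raw_lines: list[tuple[int, str]]
-- ) -> list[tuple[int, str]]:
--     """
--     Return logical lines as (start_line_num, content_cols_8_to_72).
--     - Skip comment lines (col 7 = '*' or '/')
--     - Join continuation lines (col 7 = '-') to the previous line,
--       stripping the leading quote char on the continuation if present.
--     """
--     result: list[tuple[int, str]] = []
--
--     for line_num, raw in raw_lines:
--         if len(raw) < 7:
--             continue
--         indicator = raw[6]  # col 7 is index 6 (0-based)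
--
--         if indicator in ("*", "/"):
--             # Full-line comment — skip
--             continue
--
--         content = raw[7:72].rstrip() if len(raw) > 7 else ""
--
--         if indicator == "-":
--             # Continuation: strip leading whitespace; if starts with quote, drop it
--             cont = content.lstrip()
--             if cont and cont[0] in ('"', "'"):
--                 cont = cont[1:]
--             if result:
--                 prev_num, prev_content = result[-1]
--                 result[-1] = (prev_num, prev_content + cont)
--             else:
--                 result.append((line_num, cont))
--         else:
--             result.append((line_num, content))
--
--     return result
-- ===== SOURCE B (Python) =====
-- def _frag(content):
--     cont = content.lstrip()
--     if cont and cont[0] in ('"', "'"):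
--         cont = cont[1:]
--     return cont
--
--
-- def _join_continuations(
--     raw_lines: list[tuple[int, str]]
-- ) -> list[tuple[int, str]]:
--     # Pass 1: tokenize — keep only significant lines as (line_num, is_continuation, content)
--     toks = []
--     for line_num, raw in raw_lines:
--         if len(raw) < 7 or raw[6] in ("*", "/"):
--             continue
--         content = raw[7:72].rstrip() if len(raw) > 7 else ""
--         toks.append((line_num, raw[6] == "-", content))
--     # Pass 2: group tokens into logical lines with a current-group accumulator
--     result = []
--     cur = None
--     for num, is_cont, content in toks:
--         if is_cont and cur is not None:
--             cur = (cur[0], cur[1] + _frag(content))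
--         else:
--             if cur is not None:
--                 result.append(cur)
--             cur = (num, _frag(content) if is_cont else content)
--     if cur is not None:
--         result.append(cur)
--     return result
-- ===== Notes on version B (the rewrite author's own statement) =====
-- stated objective: alternative
-- what changed: A's single loop that mutates result[-1] in place is replaced by a two-pass decomposition: a tokenize pass that keeps only significant lines as (line_num, is_continuation, content) triples, then a grouping pass with an explicit current-group accumulator that only ever appends closed groups to the output.
import Mathlib
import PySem

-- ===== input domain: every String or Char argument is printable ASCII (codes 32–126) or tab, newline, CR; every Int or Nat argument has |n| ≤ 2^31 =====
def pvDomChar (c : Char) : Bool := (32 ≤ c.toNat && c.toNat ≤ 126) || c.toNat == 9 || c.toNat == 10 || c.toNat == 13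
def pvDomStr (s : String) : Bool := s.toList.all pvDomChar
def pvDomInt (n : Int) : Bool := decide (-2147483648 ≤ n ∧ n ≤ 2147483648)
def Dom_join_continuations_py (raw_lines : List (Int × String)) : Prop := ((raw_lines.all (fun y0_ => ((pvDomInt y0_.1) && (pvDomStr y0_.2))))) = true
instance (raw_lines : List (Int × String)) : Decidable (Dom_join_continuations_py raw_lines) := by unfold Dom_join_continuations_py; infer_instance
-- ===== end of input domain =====

-- B re-decomposes A's single mutating loop into two passes (tokenize, then group with a
-- current-group accumulator); same return value, objective: alternative decomposition.

-- shared helper: A's inline continuation handling = B's _frag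
-- (lstrip then drop one leading quote character)
def pvFrag (content : List Char) : List Char :=
  match PySem.Chars.lstrip content with
  | [] => []
  | c :: rest => if c = '"' ∨ c = '\'' then rest else c :: rest

-- string concatenation prev_content + cont (done on char lists, kernel-transparent)
def pvCat (a : String) (cs : List Char) : String := String.ofList (a.toList ++ cs)

-- ===== PORT A =====
-- the body of A's for-loop, one raw line at a time
def pvStepA (result : List (Int × String)) (p : Int × String) : List (Int × String) :=
  let raw := p.2.toList
  if raw.length < 7 then result
  else
    let indicator := raw.getD 6 ' '   -- raw[6]; in range because length ≥ 7
    if indicator = '*' ∨ indicator = '/' then result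
    else
      let content := if 7 < raw.length then
          PySem.Chars.rstrip (PySem.List.slice raw (some 7) (some 72)) else []
      if indicator = '-' then
        let cont := pvFrag content
        if result ≠ [] then
          let prev := result.getLastD (0, "")
          result.dropLast ++ [(prev.1, pvCat prev.2 cont)]
        else
          result ++ [(p.1, String.ofList cont)]
      else
        result ++ [(p.1, String.ofList content)]

def join_continuations_py (raw_lines : List (Int × String)) : List (Int × String) :=
  raw_lines.foldl pvStepA []

-- ===== PORT B =====
-- pass 1: tokenize one raw line to (line_num, is_continuation, content), or skip it
def pvTok (p : Int × String) : Option (Int × Bool × List Char) :=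
  let raw := p.2.toList
  if raw.length < 7 ∨ raw.getD 6 ' ' = '*' ∨ raw.getD 6 ' ' = '/' then none
  else
    let content := if 7 < raw.length then
        PySem.Chars.rstrip (PySem.List.slice raw (some 7) (some 72)) else []
    some (p.1, (raw.getD 6 ' ' = '-' : Bool), content)

-- pass 2 loop body: state = (closed groups, current open group)
def pvStepB (st : List (Int × String) × Option (Int × String)) (t : Int × Bool × List Char) :
    List (Int × String) × Option (Int × String) :=
  if t.2.1 = true ∧ st.2.isSome then
    match st.2 with
    | some c => (st.1, some (c.1, pvCat c.2 (pvFrag t.2.2)))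
    | none => st  -- unreachable: guarded by st.2.isSome
  else
    (st.1 ++ st.2.toList,
     some (t.1, if t.2.1 then String.ofList (pvFrag t.2.2) else String.ofList t.2.2))

def join_continuations_py_alt (raw_lines : List (Int × String)) : List (Int × String) :=
  let toks := raw_lines.filterMap pvTok
  let st := toks.foldl pvStepB ([], none)
  st.1 ++ st.2.toList

-- ===== PRECONDITION & SPEC =====
def Spec_join_continuations_py (raw_lines : List (Int × String)) (out : List (Int × String)) : Prop := out = join_continuations_py_alt raw_lines
instance (raw_lines : List (Int × String)) (out : List (Int × String)) : Decidable (Spec_join_continuations_py raw_lines out) := by unfold Spec_join_continuations_py; infer_instance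

-- ===== CLAIM (what is proved, stated in full; the proofs are below) =====
def Claim_equal_join_continuations_py : Prop := ∀ (raw_lines : List (Int × String)), Dom_join_continuations_py raw_lines → Spec_join_continuations_py raw_lines (join_continuations_py raw_lines)

-- ===== LEMMAS AND PROOFS =====

-- A's loop body, expressed on a token (used only in the proofs)
def pvStepT (acc : List (Int × String)) (t : Int × Bool × List Char) : List (Int × String) :=
  if t.2.1 then
    if acc ≠ [] then
      let prev := acc.getLastD (0, "")
      acc.dropLast ++ [(prev.1, pvCat prev.2 (pvFrag t.2.2))]
    else [(t.1, String.ofList (pvFrag t.2.2))]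
  else acc ++ [(t.1, String.ofList t.2.2)]

theorem stepA_eq_tok (acc : List (Int × String)) (p : Int × String) :
    pvStepA acc p = (match pvTok p with
      | none => acc
      | some t => pvStepT acc t) := by
  unfold pvStepA pvTok pvStepT
  split_ifs <;> simp_all <;> split_ifs <;> simp_all <;> omega

theorem foldl_filterMap_tok (l : List (Int × String)) (acc : List (Int × String)) :
    l.foldl pvStepA acc = (l.filterMap pvTok).foldl pvStepT acc := by
  induction l generalizing acc with
  | nil => rfl
  | cons p rest ih =>
    simp only [List.foldl_cons, List.filterMap_cons, stepA_eq_tok]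
    cases pvTok p with
    | none => exact ih acc
    | some t => simp [ih]

-- the invariant tying B's (closed groups, open group) state to A's flat result list
theorem stepB_invariant (toks : List (Int × Bool × List Char))
    (res : List (Int × String)) (cur : Option (Int × String))
    (h : cur = none → res = []) :
    (toks.foldl pvStepB (res, cur)).1 ++ (toks.foldl pvStepB (res, cur)).2.toList
      = toks.foldl pvStepT (res ++ cur.toList) := by
  induction toks generalizing res cur with
  | nil => rfl
  | cons t rest ih =>
    simp only [List.foldl_cons]
    by_cases hcont : t.2.1 = true
    · cases cur with
      | none =>
        have hres : res = [] := h rfl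
        subst hres
        simp only [pvStepB, pvStepT, hcont, Option.isSome_none, if_false,
          Option.toList_none, List.append_nil, List.nil_append, ne_eq, if_true,
          not_true_eq_false]
        rw [ih _ _ (by simp)]
        simp
      | some c =>
        simp only [pvStepB, hcont, Option.isSome_some, and_true, if_true]
        rw [ih _ _ (by simp)]
        congr 1
        simp only [pvStepT, hcont, if_true]
        have hne : res ++ [c] ≠ [] := by simp
        simp [hne]
    · simp only [pvStepB, hcont, false_and, if_false, Bool.false_eq_true]
      rw [ih _ _ (by simp)]
      congr 1
      simp [pvStepT, hcont]

-- ===== VERDICT (by name: the statement is the Claim_ definition above) =====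
theorem join_continuations_py_spec : Claim_equal_join_continuations_py := by
  intro raw_lines _
  unfold Spec_join_continuations_py join_continuations_py join_continuations_py_alt
  rw [foldl_filterMap_tok]
  have := stepB_invariant (raw_lines.filterMap pvTok) [] none (fun _ => rfl)
  simp only [Option.toList_none, List.append_nil] at this
  exact this.symm
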